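-- pv_equiv track=rewrite | github.com/Luispmv/Ejercicios-con-Python | practica5.py | contarPares
-- ===== SOURCE A (Python) =====
-- def contarPares(cadena):
--     pares = ["ab", "cd", "xy"]
--
--     count_ab = 0
--     count_cd = 0
--     count_xy = 0
--
--     for elemento in pares:
--         if elemento in cadena:
--             if elemento == "ab":
--                 count_ab += cadena.count(elemento)
--             elif elemento == "cd":
--                 count_cd += cadena.count(elemento)
--             elif elemento == "xy":
--                 count_xy += cadena.count(elemento)
--
--     return f"ab aparece: {count_ab} veces \n cd aparece: {count_cd} veces \n xy aparece: {count_xy}"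
-- ===== SOURCE B (Python) =====
-- def contarPares(cadena):
--     count_ab = count_cd = count_xy = 0
--     for x, y in zip(cadena, cadena[1:]):
--         if x == 'a' and y == 'b':
--             count_ab += 1
--         elif x == 'c' and y == 'd':
--             count_cd += 1
--         elif x == 'x' and y == 'y':
--             count_xy += 1
--     return f"ab aparece: {count_ab} veces \n cd aparece: {count_cd} veces \n xy aparece: {count_xy}"
-- ===== Notes on version B (the rewrite author's own statement) =====
-- stated objective: alternative
-- what changed: B replaces the three separate str.count scans (each re-traversing the whole string) with one pass over the adjacent character pairs via zip(cadena, cadena[1:]), bumping three counters; valid because each pattern's two chars differ so occurrences cannot overlap.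
import Mathlib
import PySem

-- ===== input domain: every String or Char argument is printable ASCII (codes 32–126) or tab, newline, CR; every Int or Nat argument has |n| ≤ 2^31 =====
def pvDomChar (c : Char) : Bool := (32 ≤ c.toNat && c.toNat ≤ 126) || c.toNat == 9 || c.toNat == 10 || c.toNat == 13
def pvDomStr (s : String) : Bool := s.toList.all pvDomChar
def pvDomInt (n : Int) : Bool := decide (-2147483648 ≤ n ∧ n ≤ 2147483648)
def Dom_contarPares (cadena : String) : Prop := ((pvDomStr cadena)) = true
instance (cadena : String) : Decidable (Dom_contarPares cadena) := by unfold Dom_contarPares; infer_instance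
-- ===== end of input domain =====

-- B replaces A's three separate str.count scans with one pass over the adjacent character
-- pairs (zip(cadena, cadena[1:])) bumping three counters; same return value.

-- ===== PORT A =====
-- the loop body of A for one element of `pares`, updating the triple (count_ab, count_cd, count_xy)
def contarParesStep (cadena : String) (acc : Int × Int × Int) (elemento : String) : Int × Int × Int :=
  if PySem.Str.isIn elemento cadena then
    if elemento = "ab" then (acc.1 + (PySem.Str.count cadena elemento : Int), acc.2.1, acc.2.2)
    else if elemento = "cd" then (acc.1, acc.2.1 + (PySem.Str.count cadena elemento : Int), acc.2.2)
    else if elemento = "xy" then (acc.1, acc.2.1, acc.2.2 + (PySem.Str.count cadena elemento : Int))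
    else acc
  else acc

def contarPares (cadena : String) : String :=
  let pares : List String := ["ab", "cd", "xy"]
  let t := pares.foldl (contarParesStep cadena) (0, 0, 0)
  "ab aparece: " ++ PySem.Int.toStr t.1 ++ " veces \n cd aparece: " ++ PySem.Int.toStr t.2.1
    ++ " veces \n xy aparece: " ++ PySem.Int.toStr t.2.2

-- ===== PORT B =====
-- one pass over the adjacent pairs, as in Source B's `for x, y in zip(cadena, cadena[1:])`
def contarParesAltStep (acc : Int × Int × Int) (p : Char × Char) : Int × Int × Int :=
  if p.1 = 'a' ∧ p.2 = 'b' then (acc.1 + 1, acc.2.1, acc.2.2)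
  else if p.1 = 'c' ∧ p.2 = 'd' then (acc.1, acc.2.1 + 1, acc.2.2)
  else if p.1 = 'x' ∧ p.2 = 'y' then (acc.1, acc.2.1, acc.2.2 + 1)
  else acc

def contarPares_alt (cadena : String) : String :=
  let cs := cadena.toList
  let t := (cs.zip cs.tail).foldl contarParesAltStep (0, 0, 0)
  "ab aparece: " ++ PySem.Int.toStr t.1 ++ " veces \n cd aparece: " ++ PySem.Int.toStr t.2.1
    ++ " veces \n xy aparece: " ++ PySem.Int.toStr t.2.2

-- ===== PRECONDITION & SPEC =====
def Spec_contarPares (cadena : String) (out : String) : Prop := out = contarPares_alt cadena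
instance (cadena : String) (out : String) : Decidable (Spec_contarPares cadena out) := by unfold Spec_contarPares; infer_instance

-- ===== CLAIM (what is proved, stated in full; the proofs are below) =====
def Claim_equal_contarPares : Prop := ∀ (cadena : String), Dom_contarPares cadena → Spec_contarPares cadena (contarPares cadena)

-- ===== LEMMAS AND PROOFS =====

-- number of indices i with cs[i] = a, cs[i+1] = b (no overlap possible when a ≠ b)
def pairCount (a b : Char) : List Char → Int
  | x :: rest@(y :: _) => (if x = a ∧ y = b then 1 else 0) + pairCount a b rest
  | _ => 0

theorem pairCount_nonneg (a b : Char) (cs : List Char) : 0 ≤ pairCount a b cs := by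
  induction cs with
  | nil => simp [pairCount]
  | cons x t ih =>
    cases t with
    | nil => simp [pairCount]
    | cons y t' =>
      rw [pairCount]
      split_ifs <;> omega

theorem pairCount_pos_infix (a b : Char) (cs : List Char)
    (h : pairCount a b cs ≠ 0) : [a, b] <:+: cs := by
  induction cs with
  | nil => simp [pairCount] at h
  | cons x t ih =>
    cases t with
    | nil => simp [pairCount] at h
    | cons y t' =>
      rw [pairCount] at h
      by_cases hx : x = a ∧ y = b
      · exact ⟨[], t', by simp [hx.1, hx.2]⟩
      · simp [hx] at h
        exact (ih h).trans (List.suffix_cons x (y :: t')).isInfix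

theorem count_go_eq (a b : Char) (hab : a ≠ b) :
    ∀ (fuel : Nat) (l : List Char) (acc : Nat), l.length ≤ fuel →
      PySem.Chars.count.go [a, b] fuel l acc = acc + (pairCount a b l).toNat := by
  intro fuel
  induction fuel with
  | zero =>
    intro l acc hl
    have : l = [] := List.eq_nil_of_length_eq_zero (Nat.le_zero.mp hl)
    subst this
    simp [PySem.Chars.count.go, pairCount]
  | succ n ih =>
    intro l acc hl
    match l with
    | [] => simp [PySem.Chars.count.go, pairCount]
    | [x] =>
      have hpre : [a, b].isPrefixOf [x] = false := by
        simp [List.isPrefixOf]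
      rw [PySem.Chars.count.go, hpre]
      simp only [Bool.false_eq_true, if_false]
      cases n <;> simp [PySem.Chars.count.go, pairCount]
    | x :: y :: t =>
      by_cases hm : x = a ∧ y = b
      · have hpre : [a, b].isPrefixOf (x :: y :: t) = true := by
          simp [List.isPrefixOf, hm.1, hm.2]
        rw [PySem.Chars.count.go, hpre]
        simp only [if_true]
        have hlen : t.length ≤ n := by simp at hl; omega
        have htlen : (y :: t).length ≤ n := by simp at hl ⊢; omega
        have hgo : PySem.Chars.count.go [a, b] n (List.drop 2 (x :: y :: t)) (acc + 1)
            = (acc + 1) + (pairCount a b t).toNat := by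
          simpa using ih t (acc + 1) hlen
        rw [show List.drop (List.length [a, b]) (x :: y :: t) = t by simp]
        rw [ih t (acc + 1) hlen]
        -- the overlapping pair at y cannot match since y = b ≠ a
        have h1 : pairCount a b (y :: t) = pairCount a b t := by
          cases t with
          | nil => simp [pairCount]
          | cons z t' =>
            rw [pairCount]
            have : ¬ (y = a ∧ z = b) := by
              rintro ⟨hy, _⟩; exact hab (hy.symm.trans hm.2)
            simp [this]
        have h2 : pairCount a b (x :: y :: t) = 1 + pairCount a b t := by
          rw [pairCount, h1]; simp [hm]
        have := pairCount_nonneg a b t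
        rw [h2]; omega
      · have hpre : [a, b].isPrefixOf (x :: y :: t) = false := by
          by_cases hx : x = a
          · have hy : y ≠ b := fun hy => hm ⟨hx, hy⟩
            subst hx
            simp [List.isPrefixOf]
            exact fun (h : b = y) => hy h.symm
          · simp [List.isPrefixOf]
            exact fun (h : a = x) _ => hx h.symm
        rw [PySem.Chars.count.go, hpre]
        simp only [Bool.false_eq_true, if_false]
        have hlen : (y :: t).length ≤ n := by simp at hl ⊢; omega
        rw [ih (y :: t) acc hlen]
        have h2 : pairCount a b (x :: y :: t) = pairCount a b (y :: t) := by
          rw [pairCount]; simp [hm]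
        rw [h2]

theorem count_eq_pairCount (a b : Char) (hab : a ≠ b) (cs : List Char) :
    (PySem.Chars.count cs [a, b] : Int) = pairCount a b cs := by
  have h := count_go_eq a b hab cs.length cs 0 le_rfl
  rw [PySem.Chars.count]
  simp only [List.isEmpty_cons, Bool.false_eq_true, if_false]
  rw [h]
  have := pairCount_nonneg a b cs
  omega

theorem guarded_count (a b : Char) (hab : a ≠ b) (pat : String)
    (hp : pat.toList = [a, b]) (cadena : String) :
    (if PySem.Str.isIn pat cadena then
      (PySem.Str.count cadena pat : Int) else 0) = pairCount a b cadena.toList := by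
  split_ifs with h
  · rw [PySem.Str.count, hp]
    exact count_eq_pairCount a b hab cadena.toList
  · by_contra hne
    have hp2 := pairCount_pos_infix a b cadena.toList (fun h0 => hne h0.symm)
    have : PySem.Str.isIn pat cadena = true := by
      rw [PySem.Str.isIn_iff_infix, hp]; exact hp2
    exact h this

theorem foldl_alt (cs : List Char) :
    ∀ (acc : Int × Int × Int),
      (cs.zip cs.tail).foldl contarParesAltStep acc
        = (acc.1 + pairCount 'a' 'b' cs, acc.2.1 + pairCount 'c' 'd' cs, acc.2.2 + pairCount 'x' 'y' cs) := by
  induction cs with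
  | nil => intro acc; simp [pairCount]
  | cons x t ih =>
    intro acc
    cases t with
    | nil => simp [pairCount]
    | cons y t' =>
      have hz : (x :: y :: t').zip (x :: y :: t').tail
          = (x, y) :: ((y :: t').zip (y :: t').tail) := by simp
      rw [hz, List.foldl_cons, ih]
      rw [contarParesAltStep]
      have pc : ∀ a b : Char, pairCount a b (x :: y :: t')
          = (if x = a ∧ y = b then 1 else 0) + pairCount a b (y :: t') := fun a b => by
        rw [pairCount]
      rw [pc 'a' 'b', pc 'c' 'd', pc 'x' 'y']
      split_ifs <;> simp_all [Prod.ext_iff] <;> omega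

theorem foldA (cadena : String) :
    (["ab", "cd", "xy"] : List String).foldl (contarParesStep cadena) (0, 0, 0)
      = (pairCount 'a' 'b' cadena.toList, pairCount 'c' 'd' cadena.toList,
         pairCount 'x' 'y' cadena.toList) := by
  have gab := guarded_count 'a' 'b' (by decide) "ab" (by decide) cadena
  have gcd := guarded_count 'c' 'd' (by decide) "cd" (by decide) cadena
  have gxy := guarded_count 'x' 'y' (by decide) "xy" (by decide) cadena
  simp only [List.foldl_cons, List.foldl_nil, contarParesStep]
  by_cases h1 : PySem.Str.isIn "ab" cadena = true <;>
    by_cases h2 : PySem.Str.isIn "cd" cadena = true <;>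
      by_cases h3 : PySem.Str.isIn "xy" cadena = true <;>
        simp_all

-- ===== VERDICT (by name: the statement is the Claim_ definition above) =====
theorem contarPares_spec : Claim_equal_contarPares := by
  intro cadena _
  unfold Spec_contarPares contarPares contarPares_alt
  simp only [foldA, foldl_alt, zero_add]
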